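-- pv_equiv track=rewrite | github.com/HenryTech12/python-hangman-game | main.py | replace_board
-- ===== SOURCE A (Python) =====
-- def replace_board(data,at,new_ch):
--     new_board=""
--     for i in range(0,len(data)):
--         if i == at:
--             if data[i] == "*":
--                 new_board += new_ch
--         else:
--             new_board+=data[i]
--     return new_board
-- ===== SOURCE B (Python) =====
-- def replace_board(data, at, new_ch):
--     if 0 <= at < len(data):
--         mid = new_ch if data[at] == "*" else ""
--         return data[:at] + mid + data[at+1:]
--     return data
-- ===== Notes on version B (the rewrite author's own statement) =====
-- stated objective: simpler
-- what changed: Replaced the index-by-index accumulation loop with a bounds check plus slice concatenation: data[:at] + (new_ch if data[at]=='*' else '') + data[at+1:], returning data unchanged when at is out of range.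
import Mathlib
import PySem

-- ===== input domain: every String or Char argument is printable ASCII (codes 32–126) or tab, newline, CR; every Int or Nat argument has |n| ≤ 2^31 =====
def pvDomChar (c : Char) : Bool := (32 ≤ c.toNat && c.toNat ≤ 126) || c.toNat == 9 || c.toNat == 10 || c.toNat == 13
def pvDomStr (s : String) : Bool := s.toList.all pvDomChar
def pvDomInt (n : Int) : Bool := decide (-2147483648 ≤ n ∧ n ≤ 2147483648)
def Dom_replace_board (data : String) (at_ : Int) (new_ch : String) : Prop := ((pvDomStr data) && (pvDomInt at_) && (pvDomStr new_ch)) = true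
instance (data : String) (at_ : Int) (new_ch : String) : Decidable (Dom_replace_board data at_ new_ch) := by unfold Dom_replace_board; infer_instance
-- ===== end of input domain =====

-- B replaces A's index-by-index accumulation loop with a bounds check plus slice
-- concatenation (objective: simpler); same return value on every input.

-- ===== PORT A =====
-- for i in range(0, len(data)): build new_board character by character
def replace_board (data : String) (at_ : Int) (new_ch : String) : String :=
  String.ofList <|
    (PySem.List.pyRange 0 (data.toList.length : Int) 1).foldl (fun acc i =>
      if i = at_ then
        (if PySem.List.pyGetD data.toList i ' ' = '*' then acc ++ new_ch.toList else acc)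
      else acc ++ [PySem.List.pyGetD data.toList i ' ']) []

-- ===== PORT B =====
-- if 0 <= at < len(data): data[:at] + mid + data[at+1:] else data
def replace_board_alt (data : String) (at_ : Int) (new_ch : String) : String :=
  if 0 ≤ at_ ∧ at_ < (data.toList.length : Int) then
    String.ofList (PySem.List.slice data.toList none (some at_)
      ++ (if PySem.List.pyGetD data.toList at_ ' ' = '*' then new_ch.toList else [])
      ++ PySem.List.slice data.toList (some (at_ + 1)) none)
  else data

-- ===== PRECONDITION & SPEC =====
def Spec_replace_board (data : String) (at_ : Int) (new_ch : String) (out : String) : Prop := out = replace_board_alt data at_ new_ch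
instance (data : String) (at_ : Int) (new_ch : String) (out : String) : Decidable (Spec_replace_board data at_ new_ch out) := by unfold Spec_replace_board; infer_instance

-- ===== CLAIM (what is proved, stated in full; the proofs are below) =====
def Claim_equal_replace_board : Prop := ∀ (data : String) (at_ : Int) (new_ch : String), Dom_replace_board data at_ new_ch → Spec_replace_board data at_ new_ch (replace_board data at_ new_ch)

-- ===== LEMMAS AND PROOFS =====

-- When the index is negative, A's loop never hits the `i == at` branch and copies every character.
theorem foldA_neg (cs newL : List Char) (at_ : Int) (hneg : at_ < 0) :
    (PySem.List.pyRange 0 (cs.length : Int) 1).foldl (fun acc i =>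
      if i = at_ then
        (if PySem.List.pyGetD cs i ' ' = '*' then acc ++ newL else acc)
      else acc ++ [PySem.List.pyGetD cs i ' ']) [] = cs := by
  rw [PySem.List.foldl_congr_mem _ _ (fun acc i => acc ++ [PySem.List.pyGetD cs i ' ']) []
    (by
      intro acc x hx
      have hx' := (PySem.List.mem_pyRange_one).1 hx
      have : x ≠ at_ := by omega
      simp [this])]
  rw [PySem.List.foldl_append_singleton_eq_map]
  simpa [PySem.List.len] using PySem.List.map_pyGetD_pyRange_zero cs ' '

-- Characterisation of A's loop over the first n indices, for a nonnegative target index k.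
theorem foldA_nat (cs newL : List Char) (k : Nat) :
    ∀ n, n ≤ cs.length →
    (PySem.List.pyRange 0 (n : Int) 1).foldl (fun acc i =>
      if i = (k : Int) then
        (if PySem.List.pyGetD cs i ' ' = '*' then acc ++ newL else acc)
      else acc ++ [PySem.List.pyGetD cs i ' ']) [] =
    (if k < n then
      cs.take k ++ (if cs.getD k ' ' = '*' then newL else []) ++ ((cs.take n).drop (k + 1))
    else cs.take n) := by
  intro n
  induction n with
  | zero => intro _; simp [PySem.List.pyRange]
  | succ m ih =>
    intro hle
    have hm : m ≤ cs.length := by omega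
    have hcast : ((m + 1 : Nat) : Int) = (m : Int) + 1 := by push_cast; ring
    rw [hcast, PySem.List.pyRange_one_succ_right (by positivity), List.foldl_append, ih hm]
    simp only [List.foldl_cons, List.foldl_nil]
    have hget : PySem.List.pyGetD cs (m : Int) ' ' = cs.getD m ' ' :=
      PySem.List.pyGetD_natCast cs m ' '
    by_cases hk : (m : Int) = (k : Int)
    · -- the loop index hits k: previously the else-branch held (¬ k < m = k)
      have hkm : k = m := by exact_mod_cast hk.symm
      subst hkm
      rw [if_pos rfl, if_neg (lt_irrefl k), hget]
      have hsucc : k < k + 1 := Nat.lt_succ_self k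
      have hdrop : ((cs.take (k + 1)).drop (k + 1)) = [] := by
        apply List.drop_eq_nil_of_le; simp
      rw [if_pos hsucc, hdrop]
      by_cases hstar : cs[k]?.getD ' ' = '*' <;> simp [hstar]
    · -- ordinary index m ≠ k: the loop appends cs[m]
      rw [if_neg hk, hget]
      have hmlt : m < cs.length := by omega
      have hgetElem : cs.getD m ' ' = cs[m] := by
        simp [List.getD, List.getElem?_eq_getElem hmlt]
      have htake : cs.take (m + 1) = cs.take m ++ [cs[m]] := by
        rw [List.take_add_one]; simp [List.getElem?_eq_getElem hmlt]
      have hkm : k ≠ m := fun h => hk (by exact_mod_cast h.symm)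
      by_cases hlt : k < m
      · have hsucc : k < m + 1 := Nat.lt_succ_of_lt hlt
        rw [if_pos hlt, if_pos hsucc]
        have hlen : (cs.take m).length = m := by simp [hm]
        rw [hgetElem, htake, List.drop_append_of_le_length (by omega)]
        simp
      · have hns : ¬ k < m + 1 := by omega
        rw [if_neg hlt, if_neg hns, hgetElem, htake]

-- ===== VERDICT (by name: the statement is the Claim_ definition above) =====
theorem replace_board_spec : Claim_equal_replace_board := by
  intro data at_ new_ch _
  unfold Spec_replace_board replace_board replace_board_alt
  by_cases hneg : at_ < 0
  · have hcond : ¬ (0 ≤ at_ ∧ at_ < (data.toList.length : Int)) := by omega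
    rw [foldA_neg data.toList new_ch.toList at_ hneg, if_neg hcond, String.ofList_toList]
  · push_neg at hneg
    obtain ⟨k, hk⟩ : ∃ k : Nat, at_ = (k : Int) := ⟨at_.toNat, (Int.toNat_of_nonneg hneg).symm⟩
    subst hk
    rw [foldA_nat data.toList new_ch.toList k data.toList.length le_rfl]
    by_cases hlt : k < data.toList.length
    · have hcond : 0 ≤ (k : Int) ∧ (k : Int) < (data.toList.length : Int) :=
        ⟨by positivity, by exact_mod_cast hlt⟩
      rw [if_pos hlt, if_pos hcond,
        PySem.List.slice_to data.toList (by positivity),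
        PySem.List.slice_from data.toList (by positivity)]
      have h1 : ((k : Int)).toNat = k := Int.toNat_natCast k
      have h2 : ((k : Int) + 1).toNat = k + 1 := by omega
      rw [h1, h2, List.take_length, PySem.List.pyGetD_natCast data.toList k ' ']
    · have hcond : ¬ (0 ≤ (k : Int) ∧ (k : Int) < (data.toList.length : Int)) := by
        push_neg; intro _; exact_mod_cast Nat.le_of_not_lt hlt
      rw [if_neg hlt, if_neg hcond, List.take_length, String.ofList_toList]
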